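-- pv_equiv track=rewrite | github.com/pangeran-bottor/coding_challenges | leetcode/weekly_308/3.py | calculate
-- ===== SOURCE A (Python) =====
-- def calculate(garbage_type, garbage, travel):
--     result = 0
--
--     last_idx = -1
--     task = 0
--     for idx, g in enumerate(garbage):
--         count = g.count(garbage_type)
--         if count > 0:
--             result += count
--             last_idx = idx
--             task += 1
--
--     if task > 0 and last_idx > 0:
--         result += travel[last_idx-1]
--     return result
-- ===== SOURCE B (Python) =====
-- def calculate(garbage_type, garbage, travel):
--     total = sum(g.count(garbage_type) for g in garbage)
--     last = -1
--     for idx in range(len(garbage) - 1, -1, -1):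
--         if garbage_type in garbage[idx]:
--             last = idx
--             break
--     if last > 0:
--         total += travel[last - 1]
--     return total
-- ===== Notes on version B (the rewrite author's own statement) =====
-- stated objective: simpler
-- what changed: Replaces A's single forward pass carrying three accumulators (result, last_idx, task) with a one-line sum of counts plus a separate reverse scan that breaks at the last house containing the garbage type, dropping the redundant task counter.
import Mathlib
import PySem

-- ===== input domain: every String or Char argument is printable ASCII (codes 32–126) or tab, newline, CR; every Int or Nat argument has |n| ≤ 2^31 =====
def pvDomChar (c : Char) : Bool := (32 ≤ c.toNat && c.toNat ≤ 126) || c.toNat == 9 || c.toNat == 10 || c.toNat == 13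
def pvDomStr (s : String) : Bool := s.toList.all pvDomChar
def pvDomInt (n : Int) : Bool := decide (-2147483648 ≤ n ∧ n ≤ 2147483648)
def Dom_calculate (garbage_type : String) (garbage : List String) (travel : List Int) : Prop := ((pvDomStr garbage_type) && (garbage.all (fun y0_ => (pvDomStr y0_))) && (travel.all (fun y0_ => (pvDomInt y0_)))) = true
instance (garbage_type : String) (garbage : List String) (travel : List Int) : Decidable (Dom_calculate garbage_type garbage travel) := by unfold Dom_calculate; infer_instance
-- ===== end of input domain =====

-- B replaces A's single forward pass with three accumulators by a sum of counts plus a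
-- reverse scan that stops at the last hit (objective: simpler). Return values only; no mutation.

-- ===== PORT A =====
-- state = (result, last_idx, task), exactly A's loop over enumerate(garbage)
def calculate (garbage_type : String) (garbage : List String) (travel : List Int) : Int :=
  let st := (PySem.List.enumerate garbage 0).foldl
    (fun (st : Int × Int × Int) (p : Int × String) =>
      let count := PySem.Str.count p.2 garbage_type
      if 0 < count then (st.1 + (count : Int), p.1, st.2.2 + 1) else st)
    (0, -1, 0)
  if 0 < st.2.2 ∧ 0 < st.2.1 then st.1 + PySem.List.pyGetD travel (st.2.1 - 1) 0 else st.1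

-- ===== PORT B =====
-- the 'for idx in range(len(garbage)-1, -1, -1): … break' loop of Source B
def revScan (garbage_type : String) (garbage : List String) : List Int → Int
  | [] => -1
  | i :: rest =>
    if PySem.Str.isIn garbage_type (PySem.List.pyGetD garbage i "") then i
    else revScan garbage_type garbage rest

def calculate_alt (garbage_type : String) (garbage : List String) (travel : List Int) : Int :=
  let total : Int := (garbage.map (fun g => (PySem.Str.count g garbage_type : Int))).sum
  let last := revScan garbage_type garbage
    (PySem.List.pyRange ((garbage.length : Int) - 1) (-1) (-1))
  if 0 < last then total + PySem.List.pyGetD travel (last - 1) 0 else total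

-- ===== PRECONDITION & SPEC =====
-- Pre_ excludes exactly the inputs where A raises IndexError: the last house containing the
-- garbage type sits at an index i > 0 with travel[i-1] out of range (B raises there too).
def Pre_calculate (garbage_type : String) (garbage : List String) (travel : List Int) : Prop :=
  ∀ p ∈ garbage.zipIdx, PySem.Str.isIn garbage_type p.1 = true → 0 < p.2 → p.2 ≤ travel.length
instance (garbage_type : String) (garbage : List String) (travel : List Int) : Decidable (Pre_calculate garbage_type garbage travel) := by unfold Pre_calculate; infer_instance

def pvWitness_calculate : String × List String × List Int := ("a", ["ab", "b", "ca"], [3, 5])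

def Spec_calculate (garbage_type : String) (garbage : List String) (travel : List Int) (out : Int) : Prop := out = calculate_alt garbage_type garbage travel
instance (garbage_type : String) (garbage : List String) (travel : List Int) (out : Int) : Decidable (Spec_calculate garbage_type garbage travel out) := by unfold Spec_calculate; infer_instance

-- ===== CLAIM (what is proved, stated in full; the proofs are below) =====
def Claim_equal_calculate : Prop := ∀ (garbage_type : String) (garbage : List String) (travel : List Int), Dom_calculate garbage_type garbage travel → Pre_calculate garbage_type garbage travel → Spec_calculate garbage_type garbage travel (calculate garbage_type garbage travel)

-- ===== LEMMAS AND PROOFS =====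

-- count.go never decreases the accumulator
theorem count_go_ge (sub : List Char) : ∀ (fuel : Nat) (l : List Char) (acc : Nat),
    acc ≤ PySem.Chars.count.go sub fuel l acc := by
  intro fuel
  induction fuel with
  | zero => intro l acc; simp [PySem.Chars.count.go]
  | succ n ih =>
    intro l acc
    cases l with
    | nil => simp [PySem.Chars.count.go]
    | cons h t =>
      rw [PySem.Chars.count.go]
      split
      · exact le_trans (Nat.le_succ acc) (ih _ _)
      · exact ih _ _

-- with enough fuel, count.go strictly increases the accumulator iff sub occurs in l
theorem count_go_pos (sub : List Char) (hsub : sub ≠ []) :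
    ∀ (fuel : Nat) (l : List Char) (acc : Nat), l.length ≤ fuel →
    (acc < PySem.Chars.count.go sub fuel l acc ↔ ∃ j, sub <+: l.drop j) := by
  intro fuel
  induction fuel with
  | zero =>
    intro l acc hf
    have hl : l = [] := List.eq_nil_of_length_eq_zero (Nat.le_zero.mp hf)
    subst hl
    rw [PySem.Chars.count.go]
    constructor
    · intro h; exact absurd h (lt_irrefl acc)
    · rintro ⟨j, hj⟩
      exact absurd (List.prefix_nil.mp (by simpa using hj)) hsub
  | succ n ih =>
    intro l acc hf
    cases l with
    | nil =>
      rw [PySem.Chars.count.go]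
      · constructor
        · intro h; exact absurd h (lt_irrefl acc)
        · rintro ⟨j, hj⟩
          exact absurd (List.prefix_nil.mp (by simpa using hj)) hsub
      · omega
    | cons h t =>
      rw [PySem.Chars.count.go]
      split
      · rename_i hpre
        constructor
        · intro _; exact ⟨0, by simpa using List.isPrefixOf_iff_prefix.mp hpre⟩
        · intro _
          exact lt_of_lt_of_le (Nat.lt_succ_self acc) (count_go_ge sub n _ (acc + 1))
      · rename_i hpre
        have ht : t.length ≤ n := by simpa using hf
        rw [ih t acc ht]
        constructor
        · rintro ⟨j, hj⟩; exact ⟨j + 1, by simpa using hj⟩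
        · rintro ⟨j, hj⟩
          cases j with
          | zero => exact absurd (by simpa using hj) hpre
          | succ k => exact ⟨k, by simpa using hj⟩

-- Python: g.count(sub) > 0  ⇔  sub in g
theorem count_pos_iff_isIn (g sub : String) :
    (0 < PySem.Str.count g sub) ↔ PySem.Str.isIn sub g = true := by
  simp only [PySem.Str.count_eq, PySem.Str.isIn_eq]
  unfold PySem.Chars.count
  split
  · rename_i he
    simp at he
    simp [he, PySem.Chars.isIn_nil]
  · rename_i he
    have hsub : sub.toList ≠ [] := by simpa [List.isEmpty_iff] using he
    rw [count_go_pos sub.toList hsub g.toList.length g.toList 0 (le_refl _)]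
    exact PySem.Chars.exists_prefix_drop_iff_isIn _ _

-- the reverse scan ignores an element appended past all scanned indices
theorem revScan_append (gt g : String) (l : List String) (idxs : List Int)
    (h : ∀ i ∈ idxs, 0 ≤ i ∧ i < l.length) :
    revScan gt (l ++ [g]) idxs = revScan gt l idxs := by
  induction idxs with
  | nil => rfl
  | cons i rest ih =>
    obtain ⟨h0, hlt⟩ := h i (by simp)
    have : PySem.List.pyGetD (l ++ [g]) i "" = PySem.List.pyGetD l i "" := by
      obtain ⟨k, rfl⟩ := Int.eq_ofNat_of_zero_le h0
      have hk : k < l.length := by exact_mod_cast hlt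
      rw [PySem.List.pyGetD_natCast, PySem.List.pyGetD_natCast]
      simp [List.getD_eq_getElem?_getD, List.getElem?_append_left hk]
    rw [revScan, revScan, this]
    split
    · rfl
    · exact ih (fun j hj => h j (by simp [hj]))

-- abbreviations used by the invariant
def stA (gt : String) (l : List String) : Int × Int × Int :=
  (PySem.List.enumerate l 0).foldl
    (fun (st : Int × Int × Int) (p : Int × String) =>
      let count := PySem.Str.count p.2 gt
      if 0 < count then (st.1 + (count : Int), p.1, st.2.2 + 1) else st)
    (0, -1, 0)

def lastB (gt : String) (l : List String) : Int :=
  revScan gt l (PySem.List.pyRange ((l.length : Int) - 1) (-1) (-1))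

theorem lastB_append (gt g : String) (l : List String) :
    lastB gt (l ++ [g]) =
      if PySem.Str.isIn gt g then (l.length : Int) else lastB gt l := by
  unfold lastB
  have hn : (-1 : Int) < (l.length : Int) := by omega
  rw [show ((l ++ [g]).length : Int) - 1 = (l.length : Int) + 1 - 1 by simp,
      show ((l.length : Int) + 1 - 1) = (l.length : Int) by ring,
      PySem.List.pyRange_neg_one_cons hn, revScan]
  have hget : PySem.List.pyGetD (l ++ [g]) (l.length : Int) "" = g := by
    rw [PySem.List.pyGetD_natCast]
    simp [List.getD_eq_getElem?_getD]
  rw [hget]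
  split
  · rfl
  · exact revScan_append gt g l _ (fun i hi => by
      have := (PySem.List.mem_pyRange_neg_one.mp hi)
      omega)

-- the joint invariant: A's three accumulators against B's two quantities
theorem invariant (gt : String) (l : List String) :
    (stA gt l).1 = (l.map (fun g => (PySem.Str.count g gt : Int))).sum ∧
    (stA gt l).2.1 = lastB gt l ∧
    ((0 < (stA gt l).2.2 ↔ 0 ≤ lastB gt l) ∧ 0 ≤ (stA gt l).2.2) := by
  induction l using List.reverseRecOn with
  | nil =>
    have h : lastB gt [] = -1 := by
      unfold lastB
      rw [show ((([] : List String).length : Int) - 1) = -1 by simp,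
          PySem.List.pyRange_neg_one_eq_nil (le_refl _)]
      rfl
    refine ⟨rfl, h, ?_, le_refl 0⟩
    rw [h]
    show 0 < (0 : Int) ↔ (0 : Int) ≤ -1
    omega
  | append_singleton l g ih =>
    obtain ⟨ihS, ihL, ihT, ihN⟩ := ih
    have hfold : stA gt (l ++ [g]) =
        (if 0 < PySem.Str.count g gt then
          ((stA gt l).1 + (PySem.Str.count g gt : Int), (l.length : Int), (stA gt l).2.2 + 1)
         else stA gt l) := by
      unfold stA
      rw [PySem.List.enumerate_append, List.foldl_append]
      simp [PySem.List.enumerate_cons, PySem.List.enumerate_nil]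
    rw [hfold, lastB_append]
    by_cases hin : PySem.Str.isIn gt g = true
    · have hc : 0 < PySem.Str.count g gt := (count_pos_iff_isIn g gt).mpr hin
      rw [if_pos hc, if_pos hin]
      refine ⟨by simp [ihS], rfl, ?_, ?_⟩
      · show 0 < (stA gt l).2.2 + 1 ↔ (0 : Int) ≤ (l.length : Int)
        omega
      · show (0 : Int) ≤ (stA gt l).2.2 + 1
        omega
    · have hc : ¬ 0 < PySem.Str.count g gt := fun h => hin ((count_pos_iff_isIn g gt).mp h)
      rw [if_neg hc, if_neg hin]
      have h0 : PySem.Chars.count g.toList gt.toList = 0 := by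
        simpa [PySem.Str.count_eq] using Nat.le_zero.mp (Nat.not_lt.mp hc)
      exact ⟨by simp [ihS, h0], ihL, ihT, ihN⟩

-- ===== VERDICT (by name: the statement is the Claim_ definition above) =====
theorem calculate_spec : Claim_equal_calculate := by
  intro gt garbage travel _ _
  unfold Spec_calculate calculate calculate_alt
  obtain ⟨hS, hL, hT, _⟩ := invariant gt garbage
  show (if 0 < (stA gt garbage).2.2 ∧ 0 < (stA gt garbage).2.1 then
          (stA gt garbage).1 + PySem.List.pyGetD travel ((stA gt garbage).2.1 - 1) 0
        else (stA gt garbage).1) = _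
  rw [hS, hL]
  show _ = (if 0 < lastB gt garbage then
          (garbage.map (fun g => (PySem.Str.count g gt : Int))).sum
            + PySem.List.pyGetD travel (lastB gt garbage - 1) 0
        else (garbage.map (fun g => (PySem.Str.count g gt : Int))).sum)
  by_cases h : 0 < lastB gt garbage
  · rw [if_pos ⟨hT.mpr (le_of_lt h), h⟩, if_pos h]
  · rw [if_neg (fun hc => h hc.2), if_neg h]
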